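-- pv_equiv track=rewrite | github.com/eikomaniac/GoClubOnline | gco/funcs.py | convertGameDataOfStateToArray
-- ===== SOURCE A (Python) =====
-- def convertGameDataOfStateToArray(game_data):
--     board_array = [[] for i in range(9)] #Generates a two-dimensional array of 8 rows and 0 columns (as of yet)
--     sum_of_spaces = 0 #Used to calculate which row of the board the stone should be on
--     for i in game_data:
--         row = sum_of_spaces // 9
--         if len(i) == 1: #If the length is 1, then it must be only be a character
--             if i == "B":
--                 board_array[row].append("B")
--             if i == "W":
--                 board_array[row].append("W")
--             if i == "U":
--                 board_array[row].append("U")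
--             if i == "X":
--                 board_array[row].append("X")
--             sum_of_spaces += 1
--         else: #If the length is greater than 1, then it is a number showing the amount of occurrences in a row
--             length = int(i[:-1]) #This gets the number of occurrences before the character
--             for j in range(length):
--                 row = sum_of_spaces // 9
--                 if i[-1] == "B": #Checks to see what stone is being repeated occur_length many times.
--                     board_array[row].append("B")
--                 if i[-1] == "W":
--                     board_array[row].append("W")
--                 if i[-1] == "U":
--                     board_array[row].append("U")
--                 if i[-1] == "X":
--                     board_array[row].append("X")
--                 sum_of_spaces+=1
--     return board_array
-- ===== SOURCE B (Python) =====
-- def convertGameDataOfStateToArray(game_data):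
--     board_array = [[] for _ in range(9)]
--     pos = 0
--     for tok in game_data:
--         if len(tok) == 1:
--             count, ch = 1, tok
--         else:
--             count, ch = int(tok[:-1]), tok[-1]
--         adv = max(count, 0)
--         if ch in ("B", "W", "U", "X"):
--             p, end = pos, pos + adv
--             while p < end:
--                 r = p // 9
--                 n = min(end, (r + 1) * 9) - p
--                 board_array[r].extend([ch] * n)
--                 p += n
--         pos += adv
--     return board_array
-- ===== Notes on version B (the rewrite author's own statement) =====
-- stated objective: alternative
-- what changed: B parses each RLE token into (count, char) once and fills a whole run with per-row chunked extends over a running position, instead of A's per-occurrence loop that recomputes the row and re-tests the stone character on every single append.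
import Mathlib
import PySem

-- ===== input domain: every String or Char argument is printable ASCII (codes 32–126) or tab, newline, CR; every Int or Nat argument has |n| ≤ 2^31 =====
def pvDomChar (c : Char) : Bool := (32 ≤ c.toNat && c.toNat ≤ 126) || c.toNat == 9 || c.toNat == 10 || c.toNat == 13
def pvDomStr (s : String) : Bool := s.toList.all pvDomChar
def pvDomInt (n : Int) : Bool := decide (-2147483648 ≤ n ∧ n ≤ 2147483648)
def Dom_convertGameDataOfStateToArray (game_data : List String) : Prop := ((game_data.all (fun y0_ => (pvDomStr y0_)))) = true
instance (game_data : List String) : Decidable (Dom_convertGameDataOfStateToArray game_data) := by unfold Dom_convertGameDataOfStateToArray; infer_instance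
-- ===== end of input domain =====

-- B decodes each RLE token once and fills each run row-by-row with chunked extends instead of
-- appending stone-by-stone (alternative decomposition; same return value).

-- ===== PORT A =====
-- board_array[row].append(s)  (none = IndexError)
def pvAppendAt (bd : List (List String)) (row : Int) (s : String) : Option (List (List String)) :=
  match PySem.List.pyGet? bd row with
  | none => none
  | some r => some (bd.set row.toNat (r ++ [s]))

-- the four 'if i == "B": …' statements of the len==1 branch
def pvAIfsStr (bd : List (List String)) (row : Int) (i : String) : Option (List (List String)) :=
  (if i == "B" then pvAppendAt bd row "B" else some bd).bind fun bd =>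
  (if i == "W" then pvAppendAt bd row "W" else some bd).bind fun bd =>
  (if i == "U" then pvAppendAt bd row "U" else some bd).bind fun bd =>
  (if i == "X" then pvAppendAt bd row "X" else some bd)

-- the four 'if i[-1] == "B": …' statements of the inner loop
def pvAIfsChar (bd : List (List String)) (row : Int) (c : Char) : Option (List (List String)) :=
  (if c == 'B' then pvAppendAt bd row "B" else some bd).bind fun bd =>
  (if c == 'W' then pvAppendAt bd row "W" else some bd).bind fun bd =>
  (if c == 'U' then pvAppendAt bd row "U" else some bd).bind fun bd =>
  (if c == 'X' then pvAppendAt bd row "X" else some bd)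

-- one iteration of the outer 'for i in game_data' loop; state = (board_array, sum_of_spaces)
def pvAStep (st : List (List String) × Int) (i : String) : Option (List (List String) × Int) :=
  let row := PySem.Int.floordiv st.2 9
  if PySem.Str.len i == 1 then
    (pvAIfsStr st.1 row i).map (fun bd => (bd, st.2 + 1))
  else
    match PySem.Int.ofStr? (PySem.Str.slice i none (some (-1))) with   -- int(i[:-1]); none = ValueError
    | none => none
    | some length =>
      (PySem.List.pyRange 0 length 1).foldl
        (fun ost _ => ost.bind (fun st =>
          match PySem.Str.pyGet? i (-1) with                            -- i[-1] (nonempty here)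
          | none => none
          | some c => (pvAIfsChar st.1 (PySem.Int.floordiv st.2 9) c).map (fun bd => (bd, st.2 + 1))))
        (some st)

def convertGameDataOfStateToArray (game_data : List String) : List (List String) :=
  match game_data.foldl (fun ost i => ost.bind (fun st => pvAStep st i))
      (some (List.replicate 9 ([] : List String), (0 : Int))) with
  | some (bd, _) => bd
  | none => []   -- unreachable under Pre_ (a raising run)

-- ===== PORT B =====
-- the 'while p < end' chunk loop: fill positions [p, e) with ch, one row-chunk per step.
-- Structural recursion on a fuel of (e - p).toNat steps: each iteration advances p by at least 1,
-- so the fuel never runs out while p < e (proved in pv_L2 below).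
def pvFillRunAux : Nat → List (List String) → Int → Int → String → Option (List (List String))
  | 0, bd, _, _, _ => some bd
  | fuel + 1, bd, p, e, ch =>
    if p < e then
      match PySem.List.pyGet? bd (PySem.Int.floordiv p 9) with
      | none => none
      | some rowL =>
        pvFillRunAux fuel
          (bd.set (PySem.Int.floordiv p 9).toNat
            (rowL ++ List.replicate (min e ((PySem.Int.floordiv p 9 + 1) * 9) - p).toNat ch))
          (p + (min e ((PySem.Int.floordiv p 9 + 1) * 9) - p)) e ch
    else some bd

def pvFillRun (bd : List (List String)) (p e : Int) (ch : String) : Option (List (List String)) :=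
  pvFillRunAux (e - p).toNat bd p e ch

-- one iteration of B's loop; state = (board_array, pos)
def pvBStep (st : List (List String) × Int) (tok : String) : Option (List (List String) × Int) :=
  let pc : Option (Int × String) :=
    if PySem.Str.len tok == 1 then some (1, tok)
    else
      match PySem.Int.ofStr? (PySem.Str.slice tok none (some (-1))) with
      | none => none
      | some cnt =>
        match PySem.Str.pyGet? tok (-1) with
        | none => none
        | some c => some (cnt, String.ofList [c])
  match pc with
  | none => none
  | some (count, ch) =>
    let adv := max count 0
    if ch == "B" || ch == "W" || ch == "U" || ch == "X" then
      (pvFillRun st.1 st.2 (st.2 + adv) ch).map (fun bd => (bd, st.2 + adv))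
    else some (st.1, st.2 + adv)

def convertGameDataOfStateToArray_alt (game_data : List String) : List (List String) :=
  match game_data.foldl (fun ost tok => ost.bind (fun st => pvBStep st tok))
      (some (List.replicate 9 ([] : List String), (0 : Int))) with
  | some (bd, _) => bd
  | none => []

-- ===== PRECONDITION & SPEC =====
-- advance of one token (positions consumed): 1 for a 1-char token, else max(int(tok[:-1]), 0)
def pvAdv (tok : String) : Int :=
  if PySem.Str.len tok == 1 then 1
  else max ((PySem.Int.ofStr? (PySem.Str.slice tok none (some (-1)))).getD 0) 0

-- does the token place stones (its character is one of B/W/U/X)?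
def pvIsStoneTok (tok : String) : Bool :=
  if PySem.Str.len tok == 1 then tok == "B" || tok == "W" || tok == "U" || tok == "X"
  else
    match PySem.Str.pyGet? tok (-1) with
    | some c => c == 'B' || c == 'W' || c == 'U' || c == 'X'
    | none => false

-- board position before token k (sum of the advances of the earlier tokens)
def pvPosAt (game_data : List String) (k : Nat) : Int := ((game_data.take k).map pvAdv).sum

-- Pre_ = exactly the inputs on which A returns normally: every multi-char token has an int()-parsable
-- prefix (else ValueError), and no stone run reaches position 81 = row 9 (else IndexError).
def Pre_convertGameDataOfStateToArray (game_data : List String) : Prop :=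
  (∀ tok ∈ game_data, PySem.Str.len tok = 1 ∨
      (PySem.Int.ofStr? (PySem.Str.slice tok none (some (-1)))).isSome = true) ∧
  (∀ k : Nat, k < game_data.length →
      ∀ h : k < game_data.length,
      pvIsStoneTok game_data[k] = true → 0 < pvAdv game_data[k] →
      pvPosAt game_data k + pvAdv game_data[k] ≤ 81)

instance (game_data : List String) : Decidable (Pre_convertGameDataOfStateToArray game_data) := by
  unfold Pre_convertGameDataOfStateToArray; infer_instance

def pvWitness_convertGameDataOfStateToArray : List String := ["2B", "W", "3z", "10U"]

def Spec_convertGameDataOfStateToArray (game_data : List String) (out : List (List String)) : Prop := out = convertGameDataOfStateToArray_alt game_data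
instance (game_data : List String) (out : List (List String)) : Decidable (Spec_convertGameDataOfStateToArray game_data out) := by unfold Spec_convertGameDataOfStateToArray; infer_instance

-- ===== CLAIM (what is proved, stated in full; the proofs are below) =====
def Claim_equal_convertGameDataOfStateToArray : Prop := ∀ (game_data : List String), Dom_convertGameDataOfStateToArray game_data → Pre_convertGameDataOfStateToArray game_data → Spec_convertGameDataOfStateToArray game_data (convertGameDataOfStateToArray game_data)

-- ===== LEMMAS AND PROOFS =====

theorem pv_set_self {α : Type} : ∀ (l : List α) (i : Nat) (x : α), l[i]? = some x → l.set i x = l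
  | [], _, _, h => by simp at h
  | a :: l, 0, x, h => by simp_all
  | a :: l, i+1, x, h => by
      simp only [List.getElem?_cons_succ] at h
      simp [List.set, pv_set_self l i x h]

def pvStoneS (i : String) : Bool := i == "B" || i == "W" || i == "U" || i == "X"
def pvStoneC (c : Char) : Bool := c == 'B' || c == 'W' || c == 'U' || c == 'X'

theorem pv_ifsStr_eq (bd : List (List String)) (row : Int) (i : String) :
    pvAIfsStr bd row i = if pvStoneS i then pvAppendAt bd row i else some bd := by
  by_cases hB : i = "B"
  · subst hB; simp [pvAIfsStr, pvStoneS]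
  · by_cases hW : i = "W"
    · subst hW; simp [pvAIfsStr, pvStoneS]
    · by_cases hU : i = "U"
      · subst hU; simp [pvAIfsStr, pvStoneS]
      · by_cases hX : i = "X"
        · subst hX; simp [pvAIfsStr, pvStoneS]
        · simp [pvAIfsStr, pvStoneS, hB, hW, hU, hX]

theorem pv_ifsChar_eq (bd : List (List String)) (row : Int) (c : Char) :
    pvAIfsChar bd row c = if pvStoneC c then pvAppendAt bd row (String.ofList [c]) else some bd := by
  by_cases hB : c = 'B'
  · subst hB; simp [pvAIfsChar, pvStoneC]
  · by_cases hW : c = 'W'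
    · subst hW; simp [pvAIfsChar, pvStoneC]
    · by_cases hU : c = 'U'
      · subst hU; simp [pvAIfsChar, pvStoneC]
      · by_cases hX : c = 'X'
        · subst hX; simp [pvAIfsChar, pvStoneC]
        · simp [pvAIfsChar, pvStoneC, hB, hW, hU, hX]

theorem pv_stoneS_ofList (c : Char) : pvStoneS (String.ofList [c]) = pvStoneC c := by
  have key : ∀ d : Char, (String.ofList [c] == String.ofList [d]) = (c == d) := by
    intro d
    apply Bool.eq_iff_iff.mpr
    simp only [beq_iff_eq]
    constructor
    · intro h
      have := congrArg String.toList h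
      simpa using this
    · intro h; subst h; rfl
  simpa [pvStoneS, pvStoneC] using by
    rw [show ("B" : String) = String.ofList ['B'] from rfl,
        show ("W" : String) = String.ofList ['W'] from rfl,
        show ("U" : String) = String.ofList ['U'] from rfl,
        show ("X" : String) = String.ofList ['X'] from rfl,
        key 'B', key 'W', key 'U', key 'X']

-- iterate an Option-valued step n times (shape of A's inner 'for j in range(length)' fold)
def pvIter {σ : Type} (g : σ → Option σ) : Nat → Option σ → Option σ
  | 0, o => o
  | n+1, o => pvIter g n (o.bind g)

theorem pv_iter_none {σ : Type} (g : σ → Option σ) : ∀ n, pvIter g n none = none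
  | 0 => rfl
  | n+1 => by simp [pvIter, pv_iter_none g n]

theorem pv_foldl_bind_eq_iter {σ α : Type} (g : σ → Option σ) :
    ∀ (l : List α) (o : Option σ), l.foldl (fun o _ => o.bind g) o = pvIter g l.length o
  | [], o => rfl
  | x :: l, o => by
      simp only [List.foldl_cons, List.length_cons]
      rw [pv_foldl_bind_eq_iter g l (o.bind g)]; rfl

-- append ch one position at a time, k times, starting at position p
def pvSingles : List (List String) → Int → Nat → String → Option (List (List String))
  | bd, _, 0, _ => some bd
  | bd, p, k+1, ch =>
    match pvAppendAt bd (PySem.Int.floordiv p 9) ch with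
    | none => none
    | some bd' => pvSingles bd' (p+1) k ch

theorem pv_iter_skip {β : Type} : ∀ (n : Nat) (bd : β) (s : Int),
    pvIter (fun st : β × Int => some (st.1, st.2 + 1)) n (some (bd, s)) = some (bd, s + n)
  | 0, bd, s => by simp [pvIter]
  | n+1, bd, s => by
      simp only [pvIter, Option.bind_some]
      rw [pv_iter_skip n bd (s+1)]
      have : ((n : Int) + 1) = (((n+1 : Nat)) : Int) := by push_cast; ring
      rw [show s + 1 + (n : Int) = s + ((n+1 : Nat) : Int) by push_cast; ring]

theorem pv_iter_stone (ch : String) : ∀ (n : Nat) (bd : List (List String)) (s : Int),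
    pvIter (fun st => (pvAppendAt st.1 (PySem.Int.floordiv st.2 9) ch).map (fun bd => (bd, st.2 + 1)))
        n (some (bd, s))
      = (pvSingles bd s n ch).map (fun bd => (bd, s + n))
  | 0, bd, s => by simp [pvIter, pvSingles]
  | n+1, bd, s => by
      simp only [pvIter, Option.bind_some]
      cases happ : pvAppendAt bd (PySem.Int.floordiv s 9) ch with
      | none => simp only [pvSingles]; rw [happ]; simp [pv_iter_none]
      | some bd' =>
          simp only [Option.map_some]
          rw [pv_iter_stone ch n bd' (s+1)]
          simp only [pvSingles]; rw [happ]
          congr 1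
          funext bd''
          rw [show s + 1 + (n : Int) = s + ((n+1 : Nat) : Int) by push_cast; ring]

theorem pv_pyGet?_set (bd : List (List String)) (r : Int) (x old : List String)
    (hr : 0 ≤ r) (h : PySem.List.pyGet? bd r = some old) :
    PySem.List.pyGet? (bd.set r.toNat x) r = some x := by
  rw [PySem.List.pyGet?_of_nonneg _ hr] at h ⊢
  have hlen : r.toNat < bd.length := by
    by_contra hc
    rw [List.getElem?_eq_none (by omega)] at h; simp at h
  exact List.getElem?_set_eq_of_lt x hlen

theorem pv_fd_bounds (p : Int) :
    PySem.Int.floordiv p 9 * 9 ≤ p ∧ p < (PySem.Int.floordiv p 9 + 1) * 9 :=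
  (PySem.Int.floordiv_eq_iff_of_pos (a := p) (b := 9) (q := PySem.Int.floordiv p 9) (by omega)).mp rfl

theorem pv_fd_eq (p r : Int) (h1 : r * 9 ≤ p) (h2 : p < (r + 1) * 9) :
    PySem.Int.floordiv p 9 = r :=
  (PySem.Int.floordiv_eq_iff_of_pos (by omega)).mpr ⟨h1, h2⟩

-- filling one whole chunk inside a single row equals that many single appends
theorem pv_L2a (ch : String) : ∀ (n : Nat) (bd : List (List String)) (rowL : List String)
    (p : Int) (t : Nat),
    0 ≤ p →
    (∀ j : Nat, j < n → PySem.Int.floordiv (p + j) 9 = PySem.Int.floordiv p 9) →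
    PySem.List.pyGet? bd (PySem.Int.floordiv p 9) = some rowL →
    pvSingles bd p (n + t) ch
      = pvSingles (bd.set (PySem.Int.floordiv p 9).toNat (rowL ++ List.replicate n ch)) (p + n) t ch
  | 0, bd, rowL, p, t, hp, _, hget => by
      have hr0 : 0 ≤ PySem.Int.floordiv p 9 := by
        have := pv_fd_bounds p; omega
      rw [PySem.List.pyGet?_of_nonneg _ hr0] at hget
      rw [Nat.zero_add, List.replicate_zero, List.append_nil, pv_set_self _ _ _ hget,
        Nat.cast_zero, add_zero]
  | n+1, bd, rowL, p, t, hp, hrow, hget => by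
      have hr0 : 0 ≤ PySem.Int.floordiv p 9 := by
        have := pv_fd_bounds p; omega
      rw [show n + 1 + t = (n + t) + 1 by omega]
      simp only [pvSingles, pvAppendAt]
      rw [hget]
      dsimp only
      cases n with
      | zero => norm_num
      | succ m =>
          have hstep : PySem.Int.floordiv (p + 1) 9 = PySem.Int.floordiv p 9 := by
            have h1 := hrow 1 (by omega)
            simpa using h1
          have h2 : ∀ j : Nat, j < m + 1 →
              PySem.Int.floordiv (p + 1 + j) 9 = PySem.Int.floordiv (p + 1) 9 := by
            intro j hj
            have := hrow (j + 1) (by omega)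
            rw [hstep]
            rw [show p + 1 + (j : Int) = p + ((j + 1 : Nat) : Int) by push_cast; ring]
            exact this
          have h3 : PySem.List.pyGet? (bd.set (PySem.Int.floordiv p 9).toNat (rowL ++ [ch]))
              (PySem.Int.floordiv (p + 1) 9) = some (rowL ++ [ch]) := by
            rw [hstep]
            exact pv_pyGet?_set bd _ _ rowL hr0 hget
          have := pv_L2a ch (m+1) (bd.set (PySem.Int.floordiv p 9).toNat (rowL ++ [ch]))
              (rowL ++ [ch]) (p + 1) t (by omega) h2 h3
          rw [this, hstep, List.set_set]
          rw [show (rowL ++ [ch]) ++ List.replicate (m+1) ch = rowL ++ List.replicate (m+2) ch by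
            simp [List.replicate_succ]]
          rw [show p + 1 + ((m+1 : Nat) : Int) = p + ((m + 1 + 1 : Nat) : Int) by push_cast; ring]

-- the chunked while-loop equals position-by-position appending (any sufficient fuel)
theorem pv_L2aux (ch : String) : ∀ (k : Nat) (f : Nat) (bd : List (List String)) (p : Int),
    0 ≤ p → k ≤ f → pvFillRunAux f bd p (p + k) ch = pvSingles bd p k ch := by
  intro k
  induction k using Nat.strong_induction_on with
  | _ k IH =>
    intro f bd p hp hkf
    by_cases hk : k = 0
    · subst hk
      cases f with
      | zero => simp [pvFillRunAux, pvSingles]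
      | succ g =>
          simp only [pvFillRunAux]
          rw [if_neg (by omega)]
          simp [pvSingles]
    · cases f with
      | zero => omega
      | succ g =>
          simp only [pvFillRunAux]
          rw [if_pos (by omega)]
          have h9 := pv_fd_bounds p
          have hr0 : 0 ≤ PySem.Int.floordiv p 9 := by omega
          cases hget : PySem.List.pyGet? bd (PySem.Int.floordiv p 9) with
          | none =>
              obtain ⟨m, rfl⟩ : ∃ m, k = m + 1 := ⟨k - 1, by omega⟩
              simp only [pvSingles, pvAppendAt]
              rw [hget]
          | some rowL =>
              dsimp only
              set n : Int := min (p + (k:Int)) ((PySem.Int.floordiv p 9 + 1) * 9) - p with hn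
              have hn1 : 1 ≤ n := by omega
              have hnk : n.toNat ≤ k := by omega
              have hrows : ∀ j : Nat, j < n.toNat →
                  PySem.Int.floordiv (p + j) 9 = PySem.Int.floordiv p 9 := by
                intro j hj
                exact pv_fd_eq _ _ (by omega) (by omega)
              have hrec := pv_L2a ch n.toNat bd rowL p (k - n.toNat) hp hrows hget
              rw [show n.toNat + (k - n.toNat) = k by omega] at hrec
              rw [show p + ((n.toNat : Nat) : Int) = p + n by omega] at hrec
              rw [show p + (k : Int) = (p + n) + ((k - n.toNat : Nat) : Int) by omega]
              rw [IH (k - n.toNat) (by omega) g _ (p + n) (by omega) (by omega)]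
              exact hrec.symm

theorem pv_L2 (ch : String) (k : Nat) (bd : List (List String)) (p : Int) (hp : 0 ≤ p) :
    pvFillRun bd p (p + k) ch = pvSingles bd p k ch := by
  unfold pvFillRun
  rw [show (p + (k : Int) - p).toNat = k by omega]
  exact pv_L2aux ch k k bd p hp le_rfl

theorem pv_last_of_parse (i : String) (L : Int)
    (h : PySem.Int.ofStr? (PySem.Str.slice i none (some (-1))) = some L) :
    ∃ d, PySem.Str.pyGet? i (-1) = some d := by
  cases hi : i.toList with
  | nil =>
      have hempty : i = "" := by
        have := congrArg String.ofList hi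
        simpa [String.ofList_toList] using this
      rw [hempty] at h
      rw [show PySem.Int.ofStr? (PySem.Str.slice "" none (some (-1))) = none from by decide] at h
      simp at h
  | cons c cs =>
      rw [PySem.Str.pyGet?_eq, hi]
      unfold PySem.Chars.pyGet?
      rw [PySem.List.pyGet?_neg_one]
      exact ⟨(c :: cs).getLast (by simp), List.getLast?_eq_some_getLast (by simp)⟩

-- the per-token steps of A and B agree (for the nonnegative positions the loops produce)
theorem pv_step_eq (bd : List (List String)) (s : Int) (hs : 0 ≤ s) (i : String) :
    pvAStep (bd, s) i = pvBStep (bd, s) i := by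
  by_cases hlen : (PySem.Str.len i == 1) = true
  · simp only [pvAStep, pvBStep, hlen, if_true]
    rw [pv_ifsStr_eq,
      show (i == "B" || i == "W" || i == "U" || i == "X") = pvStoneS i from rfl]
    by_cases hstone : pvStoneS i = true
    · simp only [hstone, if_true]
      rw [show s + max 1 0 = s + ((1 : Nat) : Int) by norm_num]
      rw [pv_L2 i 1 bd s hs]
      simp only [pvSingles]
      cases happ : pvAppendAt bd (PySem.Int.floordiv s 9) i <;> simp
    · simp only [hstone, if_false, Bool.false_eq_true]
      norm_num
  · simp only [pvAStep, pvBStep, hlen, if_false, Bool.false_eq_true]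
    cases hof : PySem.Int.ofStr? (PySem.Str.slice i none (some (-1))) with
    | none => rfl
    | some length =>
        obtain ⟨c, hc⟩ := pv_last_of_parse i length hof
        rw [hc]
        dsimp only
        rw [pv_foldl_bind_eq_iter]
        rw [show (PySem.List.pyRange 0 length 1).length = length.toNat by
          simp [PySem.List.length_pyRange_one]]
        simp only [pv_ifsChar_eq]
        rw [show (String.ofList [c] == "B" || String.ofList [c] == "W" ||
              String.ofList [c] == "U" || String.ofList [c] == "X")
            = pvStoneS (String.ofList [c]) from rfl,
          pv_stoneS_ofList]
        by_cases hstone : pvStoneC c = true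
        · simp only [hstone, if_true]
          rw [pv_iter_stone]
          rw [show s + max length 0 = s + ((length.toNat : Nat) : Int) by omega]
          rw [pv_L2 _ length.toNat bd s hs]
        · simp only [hstone, if_false, Bool.false_eq_true]
          have hfun : (fun st : List (List String) × Int =>
                (some st.1).map (fun bd => (bd, st.2 + 1)))
              = (fun st : List (List String) × Int => some (st.1, st.2 + 1)) := by
            funext st; rfl
          rw [hfun, pv_iter_skip]
          rw [show s + ((length.toNat : Nat) : Int) = s + max length 0 by omega]

-- B's step never decreases the position
theorem pv_step_sum (bd : List (List String)) (s : Int) (i : String)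
    (bd' : List (List String)) (s' : Int)
    (h : pvBStep (bd, s) i = some (bd', s')) : s ≤ s' := by
  simp only [pvBStep] at h
  split at h
  · simp at h
  · rename_i count ch heq
    split at h
    · rcases Option.map_eq_some_iff.mp h with ⟨bd'', _, hpair⟩
      have h2 : s' = s + max count 0 := by
        have := congrArg Prod.snd hpair
        simpa using this.symm
      omega
    · injection h with h'
      have h2 := congrArg Prod.snd h'
      simp at h2
      omega

theorem pv_fold_bind_none {σ α : Type} (f : σ → α → Option σ) :
    ∀ l : List α, l.foldl (fun o i => o.bind (fun st => f st i)) none = none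
  | [] => rfl
  | i :: l => by simp [pv_fold_bind_none f l]

-- the whole loops agree
theorem pv_fold_eq : ∀ (l : List String) (bd : List (List String)) (s : Int), 0 ≤ s →
    l.foldl (fun ost i => ost.bind (fun st => pvAStep st i)) (some (bd, s))
      = l.foldl (fun ost i => ost.bind (fun st => pvBStep st i)) (some (bd, s))
  | [], _, _, _ => rfl
  | i :: l, bd, s, hs => by
      simp only [List.foldl_cons, Option.bind_some]
      rw [pv_step_eq bd s hs i]
      cases hstep : pvBStep (bd, s) i with
      | none => rw [pv_fold_bind_none, pv_fold_bind_none]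
      | some st' =>
          obtain ⟨bd', s'⟩ := st'
          exact pv_fold_eq l bd' s' (le_trans hs (pv_step_sum bd s i bd' s' hstep))


-- ===== VERDICT (by name: the statement is the Claim_ definition above) =====
theorem convertGameDataOfStateToArray_spec : Claim_equal_convertGameDataOfStateToArray := by
  intro game_data _ _
  unfold Spec_convertGameDataOfStateToArray
  unfold convertGameDataOfStateToArray convertGameDataOfStateToArray_alt
  rw [pv_fold_eq game_data _ 0 le_rfl]
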